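-- pv_equiv track=rewrite | github.com/llvm/llvm-project | clang-tools-extra/test/clang-tidy/check_clang_tidy.py | expand_std
-- ===== SOURCE A (Python) =====
-- from typing import Dict, List, Sequence, Tuple
--
-- CPP_STANDARDS = [
--     "c++98",
--     "c++11",
--     ("c++14", "c++1y"),
--     ("c++17", "c++1z"),
--     ("c++20", "c++2a"),
--     ("c++23", "c++2b"),
--     ("c++26", "c++2c"),
-- ]
--
-- C_STANDARDS = ["c99", ("c11", "c1x"), "c17", ("c23", "c2x"), "c2y"]
--
-- def expand_std(std: str) -> List[str]:
--     split_std, or_later, _ = std.partition("-or-later")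
--
--     if not or_later:
--         return [split_std]
--
--     for standard_list in (CPP_STANDARDS, C_STANDARDS):
--         item = next(
--             (
--                 i
--                 for i, v in enumerate(standard_list)
--                 if (split_std in v if isinstance(v, (list, tuple)) else split_std == v)
--             ),
--             None,
--         )
--         if item is not None:
--             return [split_std] + [
--                 x if isinstance(x, str) else x[0] for x in standard_list[item + 1 :]
--             ]
--     return [std]
-- ===== SOURCE B (Python) =====
-- from typing import Dict, List, Optional
--
-- CPP_STANDARDS = [
--     "c++98",
--     "c++11",
--     ("c++14", "c++1y"),
--     ("c++17", "c++1z"),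
--     ("c++20", "c++2a"),
--     ("c++23", "c++2b"),
--     ("c++26", "c++2c"),
-- ]
--
-- C_STANDARDS = ["c99", ("c11", "c1x"), "c17", ("c23", "c2x"), "c2y"]
--
-- # Successor-link table built once: every alias points to the canonical name of
-- # the NEXT standard in its family (None for the newest one).
-- _NEXT: Dict[str, Optional[str]] = {}
-- for _lst in (CPP_STANDARDS, C_STANDARDS):
--     _canon = [x if isinstance(x, str) else x[0] for x in _lst]
--     for _i, _v in enumerate(_lst):
--         _succ = _canon[_i + 1] if _i + 1 < len(_canon) else None
--         for _a in ([_v] if isinstance(_v, str) else _v):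
--             _NEXT[_a] = _succ
--
-- def expand_std(std: str) -> List[str]:
--     split_std, or_later, _ = std.partition("-or-later")
--     if not or_later:
--         return [split_std]
--     if split_std not in _NEXT:
--         return [std]
--     out = [split_std]
--     cur = _NEXT[split_std]
--     while cur is not None:
--         out.append(cur)
--         cur = _NEXT[cur]
--     return out
-- ===== Notes on version B (the rewrite author's own statement) =====
-- stated objective: alternative
-- what changed: Replaces A's per-call scan of the standards lists with index/slice/map by a successor-link table built once (alias -> canonical name of the next standard, None at the end); expand_std walks that chain of next-links like a linked list, appending to an accumulator, instead of slicing and mapping a list tail.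
import Mathlib
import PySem

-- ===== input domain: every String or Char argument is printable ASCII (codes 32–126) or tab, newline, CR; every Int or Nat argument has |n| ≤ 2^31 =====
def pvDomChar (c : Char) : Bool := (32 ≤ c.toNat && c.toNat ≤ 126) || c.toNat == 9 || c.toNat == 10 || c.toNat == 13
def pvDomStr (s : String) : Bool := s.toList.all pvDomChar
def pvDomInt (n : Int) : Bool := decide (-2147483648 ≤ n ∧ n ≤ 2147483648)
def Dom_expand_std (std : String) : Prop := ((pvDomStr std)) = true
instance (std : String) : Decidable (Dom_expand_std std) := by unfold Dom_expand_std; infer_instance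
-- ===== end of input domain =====

-- B replaces A's scan-then-slice of the standards lists by a successor-link table built once
-- (alias -> next canonical standard); expand walks that chain like a linked list (alternative).

-- shared faithful helper: s.partition(sep) for the fixed non-empty sep used here
def pyPartition (s sep : String) : String × String × String :=
  let i := PySem.Str.find s sep
  if i = -1 then (s, "", "")
  else (String.ofList (PySem.List.slice s.toList none (some i)), sep,
        String.ofList (PySem.List.slice s.toList (some (i + (PySem.Str.len sep : Int))) none))

-- a standards-list entry: a plain string or a (canonical, alias) tuple
def pvCanon : String ⊕ (String × String) → String
  | .inl v => v
  | .inr p => p.1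

-- 'split_std in v if isinstance(v, (list, tuple)) else split_std == v'
def pvMatch (s : String) : String ⊕ (String × String) → Bool
  | .inl v => s == v
  | .inr p => s == p.1 || s == p.2

def pvCppStandards : List (String ⊕ (String × String)) :=
  [.inl "c++98", .inl "c++11", .inr ("c++14", "c++1y"), .inr ("c++17", "c++1z"),
   .inr ("c++20", "c++2a"), .inr ("c++23", "c++2b"), .inr ("c++26", "c++2c")]

def pvCStandards : List (String ⊕ (String × String)) :=
  [.inl "c99", .inr ("c11", "c1x"), .inl "c17", .inr ("c23", "c2x"), .inl "c2y"]

-- ===== PORT A =====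
def expand_std (std : String) : List String :=
  let p := pyPartition std "-or-later"
  let split_std := p.1
  let or_later := p.2.1
  if or_later = "" then [split_std]
  else
    (([pvCppStandards, pvCStandards].findSome? (fun standard_list =>
        (standard_list.findIdx? (pvMatch split_std)).map (fun item =>
          split_std :: (standard_list.drop (item + 1)).map pvCanon)))).getD [std]

-- ===== PORT B =====
def pvAliases : String ⊕ (String × String) → List String
  | .inl v => [v]
  | .inr p => [p.1, p.2]

-- module-scope successor table: every alias -> canonical name of the NEXT standard (none at end)
def pvNextTbl : PySem.Dict String (Option String) :=
  [pvCppStandards, pvCStandards].foldl (fun d lst =>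
    let canon := lst.map pvCanon
    (PySem.List.enumerate lst).foldl (fun d iv =>
      let succ := canon[iv.1.toNat + 1]?
      (pvAliases iv.2).foldl (fun d a => d.insert a succ) d) d)
    PySem.Dict.empty

-- the 'while cur is not None' walk; fuel bounds the (finite) chain, never exhausted
def pvChase : Nat → Option String → List String → List String
  | 0, _, acc => acc.reverse
  | _ + 1, none, acc => acc.reverse
  | f + 1, some c, acc => pvChase f ((pvNextTbl.get? c).getD none) (c :: acc)

def expand_std_alt (std : String) : List String :=
  let p := pyPartition std "-or-later"
  let split_std := p.1
  let or_later := p.2.1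
  if or_later = "" then [split_std]
  else if pvNextTbl.keys.contains split_std then
    pvChase 16 ((pvNextTbl.get? split_std).getD none) [split_std]
  else [std]

-- ===== PRECONDITION & SPEC =====
def Spec_expand_std (std : String) (out : List String) : Prop := out = expand_std_alt std
instance (std : String) (out : List String) : Decidable (Spec_expand_std std out) := by unfold Spec_expand_std; infer_instance

-- ===== CLAIM (what is proved, stated in full; the proofs are below) =====
def Claim_equal_expand_std : Prop := ∀ (std : String), Dom_expand_std std → Spec_expand_std std (expand_std std)

-- ===== LEMMAS AND PROOFS =====

-- every alias occurring anywhere in the two standards lists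
def pvAliasList : List String :=
  ["c++98", "c++11", "c++14", "c++1y", "c++17", "c++1z", "c++20", "c++2a",
   "c++23", "c++2b", "c++26", "c++2c", "c99", "c11", "c1x", "c17", "c23", "c2x", "c2y"]

lemma pvMatch_false (s : String) (hs : s ∉ pvAliasList)
    (lst : List (String ⊕ (String × String)))
    (hl : lst = pvCppStandards ∨ lst = pvCStandards) :
    lst.findIdx? (pvMatch s) = none := by
  rw [List.findIdx?_eq_none_iff]
  rcases hl with rfl | rfl <;>
    · intro x hx
      fin_cases hx <;>
        simp only [pvMatch, Bool.or_eq_false_iff, beq_eq_false_iff_ne, ne_eq] <;>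
        first
          | (rintro rfl; exact hs (by decide))
          | (refine ⟨?_, ?_⟩ <;> (rintro rfl; exact hs (by decide)))

lemma pv_core (s t : String) :
    (([pvCppStandards, pvCStandards].findSome? (fun standard_list =>
        (standard_list.findIdx? (pvMatch s)).map (fun item =>
          s :: (standard_list.drop (item + 1)).map pvCanon)))).getD [t]
      = if pvNextTbl.keys.contains s then
          pvChase 16 ((pvNextTbl.get? s).getD none) [s]
        else [t] := by
  by_cases hs : s ∈ pvAliasList
  · fin_cases hs <;> rfl
  · have h1 := pvMatch_false s hs pvCppStandards (Or.inl rfl)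
    have h2 := pvMatch_false s hs pvCStandards (Or.inr rfl)
    have hm : s ∉ pvNextTbl.keys := by
      have hkeys : pvNextTbl.keys = pvAliasList := by decide
      rw [hkeys]; exact hs
    simp [List.findSome?, h1, h2, hm]

-- ===== VERDICT (by name: the statement is the Claim_ definition above) =====
theorem expand_std_spec : Claim_equal_expand_std := by
  intro std _
  unfold Spec_expand_std expand_std expand_std_alt
  generalize pyPartition std "-or-later" = p
  obtain ⟨s, ol, r⟩ := p
  by_cases h : ol = ""
  · simp [h]
  · simp only [h, if_false]
    exact pv_core s std
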